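-- pv_equiv track=rewrite | github.com/WalterA/allrepo | ITSCloud-main/Python/Prima_luglio/Lezione_in_classe/ver7.py | rimuovi_elementi
-- ===== SOURCE A (Python) =====
-- def rimuovi_elementi(lista: list[int], da_rimuovere: dict[int, int]) -> list[int]:
--     lista_risultato = lista.copy()
--
--     for elemento, volte in da_rimuovere.items():
--         conteggio = 0
--         while conteggio < volte:
--             if elemento in lista_risultato:
--                 lista_risultato.remove(elemento)
--                 conteggio += 1
--             else:
--                 break
--
--     return lista_risultato
-- ===== SOURCE B (Python) =====
-- def rimuovi_elementi(lista: list[int], da_rimuovere: dict[int, int]) -> list[int]: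
--     remaining = {}
--     for elemento, volte in da_rimuovere.items():
--         if volte > 0:
--             remaining[elemento] = remaining.get(elemento, 0) + volte
--     risultato = []
--     for x in lista:
--         if remaining.get(x, 0) > 0:
--             remaining[x] -= 1
--         else:
--             risultato.append(x)
--     return risultato
-- ===== Notes on version B (the rewrite author's own statement) =====
-- stated objective: faster
-- what changed: Instead of mutating a working copy with one membership test plus list.remove scan-and-shift per removal, B aggregates the removal budgets into one counter dict and skips elements in a single pass over the list.
import Mathlib
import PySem

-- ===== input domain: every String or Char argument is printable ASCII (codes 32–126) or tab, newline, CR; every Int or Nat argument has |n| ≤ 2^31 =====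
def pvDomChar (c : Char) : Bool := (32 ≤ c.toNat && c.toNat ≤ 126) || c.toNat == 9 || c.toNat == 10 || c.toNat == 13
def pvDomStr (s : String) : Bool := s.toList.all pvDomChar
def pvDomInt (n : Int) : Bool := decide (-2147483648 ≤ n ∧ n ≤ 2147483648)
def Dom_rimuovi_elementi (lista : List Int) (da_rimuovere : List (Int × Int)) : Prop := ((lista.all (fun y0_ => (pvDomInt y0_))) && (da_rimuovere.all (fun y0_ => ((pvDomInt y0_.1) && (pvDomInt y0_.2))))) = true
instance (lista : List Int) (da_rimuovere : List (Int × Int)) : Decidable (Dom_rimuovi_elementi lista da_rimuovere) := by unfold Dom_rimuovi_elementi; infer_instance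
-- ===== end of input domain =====

-- B replaces A's repeated membership-test + list.remove passes on a mutating working copy by
-- aggregating the removal budgets into one counter dict and skipping elements in a single pass
-- (objective: faster — one pass over the list instead of one scan-and-shift per removal).

-- ===== PORT A =====
-- A's inner 'while conteggio < volte: if elemento in lista: lista.remove(elemento); conteggio += 1 else: break'
def pvWhileA (el volte conteggio : Int) (lst : List Int) : List Int :=
  if _h : conteggio < volte then
    if el ∈ lst then
      pvWhileA el volte (conteggio + 1) ((PySem.List.remove? lst el).getD lst)
    else lst
  else lst
termination_by (volte - conteggio).toNat
decreasing_by omega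

def rimuovi_elementi (lista : List Int) (da_rimuovere : List (Int × Int)) : List Int :=
  da_rimuovere.foldl (fun lista_risultato p => pvWhileA p.1 p.2 0 lista_risultato) lista

-- ===== PORT B =====
def rimuovi_elementi_alt (lista : List Int) (da_rimuovere : List (Int × Int)) : List Int :=
  let remaining := da_rimuovere.foldl
    (fun d p => if p.2 > 0 then d.insert p.1 (d.getD p.1 0 + p.2) else d)
    (PySem.Dict.empty : PySem.Dict Int Int)
  (lista.foldl
    (fun (s : PySem.Dict Int Int × List Int) x =>
      if s.1.getD x 0 > 0 then (s.1.insert x (s.1.getD x 0 - 1), s.2)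
      else (s.1, s.2 ++ [x]))
    (remaining, [])).2

-- ===== PRECONDITION & SPEC =====
def Spec_rimuovi_elementi (lista : List Int) (da_rimuovere : List (Int × Int)) (out : List Int) : Prop := out = rimuovi_elementi_alt lista da_rimuovere
instance (lista : List Int) (da_rimuovere : List (Int × Int)) (out : List Int) : Decidable (Spec_rimuovi_elementi lista da_rimuovere out) := by unfold Spec_rimuovi_elementi; infer_instance

-- ===== CLAIM (what is proved, stated in full; the proofs are below) =====
def Claim_equal_rimuovi_elementi : Prop := ∀ (lista : List Int) (da_rimuovere : List (Int × Int)), Dom_rimuovi_elementi lista da_rimuovere → Spec_rimuovi_elementi lista da_rimuovere (rimuovi_elementi lista da_rimuovere)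

-- ===== LEMMAS AND PROOFS =====

-- remove the first occurrence of el, k times (stop when absent): what A's while loop computes
def pvRemoveN (el : Int) (k : Nat) (lst : List Int) : List Int :=
  match k with
  | 0 => lst
  | k + 1 =>
    match PySem.List.remove? lst el with
    | some l' => pvRemoveN el k l'
    | none => lst

-- canonical form of both programs: walk the list once, skipping the first T x copies of each x
def pvKeep (T : Int → Nat) : List Int → List Int
  | [] => []
  | x :: xs =>
    if 0 < T x then pvKeep (fun y => if y = x then T x - 1 else T y) xs
    else x :: pvKeep T xs

-- total removal budget of x over the pairs (negative budgets count as 0)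
def pvTf (pairs : List (Int × Int)) (x : Int) : Nat :=
  (pairs.map (fun p => if p.1 = x then p.2.toNat else 0)).sum

theorem pvWhileA_eq_removeN (el : Int) : ∀ (k : Nat) (volte c : Int), (volte - c).toNat = k →
    ∀ lst, pvWhileA el volte c lst = pvRemoveN el k lst := by
  intro k
  induction k with
  | zero =>
    intro volte c hk lst
    rw [pvWhileA]
    simp only [pvRemoveN]
    have : ¬ c < volte := by omega
    simp [this]
  | succ k ih =>
    intro volte c hk lst
    rw [pvWhileA]
    have hc : c < volte := by omega
    rw [dif_pos hc]
    by_cases hm : el ∈ lst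
    · simp only [hm, if_true]
      rcases hs : PySem.List.remove? lst el with _ | l'
      · exact absurd ((PySem.List.remove?_eq_none_iff lst el).mp hs) (by simpa using hm)
      · simp only [pvRemoveN, hs, Option.getD_some]
        exact ih volte (c + 1) (by omega) l'
    · simp only [hm, if_false]
      have : PySem.List.remove? lst el = none := (PySem.List.remove?_eq_none_iff lst el).mpr hm
      simp [pvRemoveN, this]

theorem pvRemoveN_nil (el : Int) (k : Nat) : pvRemoveN el k [] = [] := by
  cases k <;> simp [pvRemoveN, PySem.List.remove?]

theorem pvRemoveN_cons_ne (el x : Int) (hx : x ≠ el) (k : Nat) (t : List Int) :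
    pvRemoveN el k (x :: t) = x :: pvRemoveN el k t := by
  induction k generalizing t with
  | zero => simp [pvRemoveN]
  | succ k ih =>
    simp only [pvRemoveN, PySem.List.remove?_cons_of_ne t hx]
    rcases hs : PySem.List.remove? t el with _ | l' <;> simp [ih]

theorem pvKeep_zero : ∀ (lst : List Int), pvKeep (fun _ => 0) lst = lst := by
  intro lst
  induction lst with
  | nil => simp [pvKeep]
  | cons x xs ih => simp [pvKeep, ih]

-- removing el k times up front, then skipping per budget T, is skipping per budget T + k·el
theorem pvKeep_removeN (el : Int) : ∀ (lst : List Int) (T : Int → Nat) (k : Nat),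
    pvKeep T (pvRemoveN el k lst) =
      pvKeep (fun y => if y = el then T y + k else T y) lst := by
  intro lst
  induction lst with
  | nil => intro T k; simp [pvRemoveN_nil, pvKeep]
  | cons x xs ih =>
    intro T k
    by_cases hx : x = el
    · subst hx
      cases k with
      | zero =>
        have : (fun y => if y = x then T y + 0 else T y) = T := by
          funext y; split <;> rfl
        rw [this]
        simp [pvRemoveN]
      | succ k =>
        have hrem : pvRemoveN x (k + 1) (x :: xs) = pvRemoveN x k xs := by
          simp [pvRemoveN, PySem.List.remove?_cons_self]
        rw [hrem, ih T k]
        have hpos : 0 < (fun y => if y = x then T y + (k + 1) else T y) x := by simp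
        conv_rhs => rw [pvKeep]
        rw [if_pos hpos]
        have : (fun y => if y = x then (if x = x then T x + (k + 1) else T x) - 1
                  else if y = x then T y + (k + 1) else T y) =
               (fun y => if y = x then T y + k else T y) := by
          funext y; by_cases hy : y = x <;> simp [hy]
        rw [this]
    · rw [pvRemoveN_cons_ne el x hx k xs]
      by_cases hp : 0 < T x
      · have hp' : 0 < (fun y => if y = el then T y + k else T y) x := by
          simp [hx, hp]
        conv_lhs => rw [pvKeep]
        rw [if_pos hp]
        conv_rhs => rw [pvKeep]
        rw [if_pos hp']
        rw [ih (fun y => if y = x then T x - 1 else T y) k]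
        congr 1
        funext y
        by_cases hyx : y = x
        · subst hyx; simp [hx]
        · by_cases hy : y = el <;>
            simp [hyx, hy, (show ¬ el = x from fun h => hx h.symm)]
      · have hp' : ¬ 0 < (fun y => if y = el then T y + k else T y) x := by
          simp [hx]; omega
        conv_lhs => rw [pvKeep]
        rw [if_neg hp]
        conv_rhs => rw [pvKeep]
        rw [if_neg hp']
        rw [ih T k]

-- A's fold of while-loops is the canonical skip with the aggregated budgets
theorem pvA_eq_keep : ∀ (pairs : List (Int × Int)) (lst : List Int),
    pairs.foldl (fun acc p => pvWhileA p.1 p.2 0 acc) lst = pvKeep (pvTf pairs) lst := by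
  intro pairs
  induction pairs with
  | nil =>
    intro lst
    have : pvTf [] = fun _ => 0 := by funext x; simp [pvTf]
    simp [this, pvKeep_zero]
  | cons p rest ih =>
    intro lst
    simp only [List.foldl_cons]
    rw [ih (pvWhileA p.1 p.2 0 lst)]
    rw [pvWhileA_eq_removeN p.1 (p.2 - 0).toNat p.2 0 rfl lst]
    rw [pvKeep_removeN p.1 lst (pvTf rest) (p.2 - 0).toNat]
    congr 1
    funext y
    simp only [pvTf, List.map_cons, List.sum_cons]
    by_cases hy : y = p.1 <;> simp [hy, eq_comm] <;> try omega

-- the counter dict built by B holds exactly the aggregated budgets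
theorem pvBuild_getD : ∀ (pairs : List (Int × Int)) (d : PySem.Dict Int Int) (x : Int),
    (pairs.foldl (fun d p => if p.2 > 0 then d.insert p.1 (d.getD p.1 0 + p.2) else d) d).getD x 0
      = d.getD x 0 + (pvTf pairs x : Int) := by
  intro pairs
  induction pairs with
  | nil => intro d x; simp [pvTf]
  | cons p rest ih =>
    intro d x
    simp only [List.foldl_cons]
    by_cases hp : p.2 > 0
    · rw [if_pos hp, ih]
      rw [PySem.Dict.getD_insert]
      simp only [pvTf, List.map_cons, List.sum_cons]
      by_cases hx : x = p.1 <;> simp [hx, eq_comm] <;> try omega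
    · rw [if_neg hp, ih]
      simp only [pvTf, List.map_cons, List.sum_cons]
      have : p.2.toNat = 0 := by omega
      by_cases hx : x = p.1 <;> simp [hx, eq_comm, this]

-- B's single pass is the canonical skip, for any dict agreeing pointwise with the budgets
theorem pvPass_eq_keep : ∀ (xs : List Int) (d : PySem.Dict Int Int) (acc : List Int)
    (T : Int → Nat), (∀ x, d.getD x 0 = (T x : Int)) →
    (xs.foldl
      (fun (s : PySem.Dict Int Int × List Int) x =>
        if s.1.getD x 0 > 0 then (s.1.insert x (s.1.getD x 0 - 1), s.2)
        else (s.1, s.2 ++ [x]))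
      (d, acc)).2 = acc ++ pvKeep T xs := by
  intro xs
  induction xs with
  | nil => intro d acc T _; simp [pvKeep]
  | cons x t ih =>
    intro d acc T hT
    simp only [List.foldl_cons]
    by_cases hp : 0 < T x
    · have hd : d.getD x 0 > 0 := by rw [hT x]; exact_mod_cast hp
      rw [if_pos hd]
      have hT' : ∀ y, (d.insert x (d.getD x 0 - 1)).getD y 0 =
          ((if y = x then T x - 1 else T y : Nat) : Int) := by
        intro y
        rw [PySem.Dict.getD_insert]
        by_cases hy : y = x <;> simp [hy, hT x, hT y] <;> try omega
      rw [ih _ acc (fun y => if y = x then T x - 1 else T y) hT']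
      conv_rhs => rw [pvKeep]
      rw [if_pos hp]
    · have hd : ¬ d.getD x 0 > 0 := by rw [hT x]; omega
      rw [if_neg hd]
      rw [ih d (acc ++ [x]) T hT]
      conv_rhs => rw [pvKeep]
      rw [if_neg hp]
      simp

-- ===== VERDICT (by name: the statement is the Claim_ definition above) =====
theorem rimuovi_elementi_spec : Claim_equal_rimuovi_elementi := by
  intro lista da _
  unfold Spec_rimuovi_elementi rimuovi_elementi rimuovi_elementi_alt
  rw [pvA_eq_keep da lista]
  rw [pvPass_eq_keep lista _ [] (pvTf da)
    (fun x => by rw [pvBuild_getD da PySem.Dict.empty x]; simp)]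
  simp
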